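-- pv_equiv track=rewrite | github.com/wgshbd1971/fronius_modbus | custom_components/fronius_modbus/extmodbusclient.py | bitmask_to_strings
-- ===== SOURCE A (Python) =====
-- def bitmask_to_strings(bitmask, bitmask_list, bits=16):
--     strings = []
--     len_list = len(bitmask_list)
--     for bit in range(bits):
--         if bitmask & (1<<bit):
--             if bit < len_list:
--                 value = bitmask_list[bit]
--             else:
--                 value = f'bit {bit} undefined'
--             strings.append(value)
--     return strings
-- ===== SOURCE B (Python) =====
-- def bitmask_to_strings(bitmask, bitmask_list, bits=16):
--     # Render the low `bits` bits of the mask as a reversed binary string, build the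
--     # full label table once (known labels then 'bit i undefined' fillers), and keep
--     # the labels paired with a '1' digit. zip truncates at the binary string, which
--     # is at most `bits` long; bits beyond it are zero, so nothing is lost.
--     if bits <= 0:
--         return []
--     m = bitmask & ((1 << bits) - 1)
--     rev = bin(m)[2:][::-1]
--     labels = bitmask_list[:bits] + [f'bit {b} undefined' for b in range(len(bitmask_list), bits)]
--     return [lab for ch, lab in zip(rev, labels) if ch == '1']
-- ===== Notes on version B (the rewrite author's own statement) =====
-- stated objective: alternative
-- what changed: B replaces A's per-bit test-and-append loop with a data-driven pipeline: it masks the low bits, renders them all at once as a reversed binary string via bin(), precomputes the complete label table (real labels then undefined fillers), and selects by zipping the digit string with the table.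
import Mathlib
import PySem

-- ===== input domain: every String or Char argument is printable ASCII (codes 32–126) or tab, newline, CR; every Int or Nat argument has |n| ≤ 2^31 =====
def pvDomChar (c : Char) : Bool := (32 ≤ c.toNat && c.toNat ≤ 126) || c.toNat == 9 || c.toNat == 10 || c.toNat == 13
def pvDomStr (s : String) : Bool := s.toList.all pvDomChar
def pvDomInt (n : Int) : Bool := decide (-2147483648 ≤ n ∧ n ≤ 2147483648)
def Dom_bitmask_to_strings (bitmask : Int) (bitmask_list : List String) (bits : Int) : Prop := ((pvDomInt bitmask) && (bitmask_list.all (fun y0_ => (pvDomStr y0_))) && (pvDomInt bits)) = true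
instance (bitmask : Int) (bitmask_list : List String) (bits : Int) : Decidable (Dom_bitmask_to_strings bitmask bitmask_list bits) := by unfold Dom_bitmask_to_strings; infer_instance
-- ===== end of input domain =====

-- B builds the answer by data, not by a test-and-append loop: it masks the low bits, renders them
-- once as a reversed binary digit string, precomputes the full label table, and zip-filters the two.


-- ===== PORT A =====
-- Python: 1<<bit with bit drawn from range(bits), hence bit ≥ 0, so `bit.toNat` is exact;
-- bitmask_list[bit] is guarded by 0 ≤ bit < len, so pyGet? always returns `some` and `.getD ""` is exact.
def bitmask_to_strings (bitmask : Int) (bitmask_list : List String) (bits : Int) : List String :=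
  let len_list : Int := bitmask_list.length
  (PySem.List.pyRange 0 bits 1).foldl (fun strings bit =>
    if PySem.Int.band bitmask ((1 : Int) <<< (bit.toNat : Nat)) ≠ 0 then
      strings ++ [if bit < len_list then (PySem.List.pyGet? bitmask_list bit).getD ""
                  else "bit " ++ PySem.Int.toStr bit ++ " undefined"]
    else strings) []

-- ===== PORT B =====
-- bin(n)[2:][::-1] for n ≥ 0, computed least-significant-bit first (exact: reversing the
-- most-significant-first digits of bin() yields exactly this list; bin(0)[2:] is "0").
def binRev : Nat → List Char
  | 0 => []
  | n + 1 => (if (n + 1) % 2 = 1 then '1' else '0') :: binRev ((n + 1) / 2)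
decreasing_by omega

def revDigits (n : Nat) : List Char := if n = 0 then ['0'] else binRev n

-- m = bitmask & ((1 << bits) - 1) is nonnegative (the right operand is), so `m.toNat` is exact.
def bitmask_to_strings_alt (bitmask : Int) (bitmask_list : List String) (bits : Int) : List String :=
  if bits ≤ 0 then []
  else
    let m : Int := PySem.Int.band bitmask (((1 : Int) <<< (bits.toNat : Nat)) - 1)
    let rev : List Char := revDigits m.toNat
    let labels : List String :=
      PySem.List.slice bitmask_list none (some bits) ++
        (PySem.List.pyRange (bitmask_list.length : Int) bits 1).map
          (fun b => "bit " ++ PySem.Int.toStr b ++ " undefined")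
    ((rev.zip labels).filter (fun p => p.1 == '1')).map Prod.snd

-- ===== PRECONDITION & SPEC =====
def Spec_bitmask_to_strings (bitmask : Int) (bitmask_list : List String) (bits : Int) (out : List String) : Prop := out = bitmask_to_strings_alt bitmask bitmask_list bits
instance (bitmask : Int) (bitmask_list : List String) (bits : Int) (out : List String) : Decidable (Spec_bitmask_to_strings bitmask bitmask_list bits out) := by unfold Spec_bitmask_to_strings; infer_instance

-- ===== CLAIM (what is proved, stated in full; the proofs are below) =====
def Claim_equal_bitmask_to_strings : Prop := ∀ (bitmask : Int) (bitmask_list : List String) (bits : Int), Dom_bitmask_to_strings bitmask bitmask_list bits → Spec_bitmask_to_strings bitmask bitmask_list bits (bitmask_to_strings bitmask bitmask_list bits)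

-- ===== LEMMAS AND PROOFS =====

-- the common label function both sides compute at index k
def gN (l : List String) (k : Nat) : String :=
  if k < l.length then l[k]?.getD "" else "bit " ++ PySem.Int.toStr (k : Int) ++ " undefined"

-- Python `a & b` for a = -n-1 < 0 ≤ b, from PySem's definition
theorem band_negSucc (n b : Nat) :
    PySem.Int.band (Int.negSucc n) (Int.ofNat b) = Int.ofNat (b - (b &&& n)) := by
  simp [PySem.Int.band]

-- `m & (1 << b)` is nonzero exactly when bit b of m is set (Python two's-complement semantics)
theorem band_pow_ne (m : Int) (b : Nat) :
    (PySem.Int.band m ((1 : Int) <<< b) ≠ 0) ↔ m.testBit b = true := by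
  have hs : (1 : Int) <<< b = Int.ofNat (2 ^ b) := by
    show Int.ofNat (1 <<< b) = Int.ofNat (2 ^ b); rw [Nat.one_shiftLeft]
  rw [hs]
  have h2 : 0 < 2 ^ b := Nat.two_pow_pos b
  cases m with
  | ofNat n =>
      have hband : PySem.Int.band (Int.ofNat n) (Int.ofNat (2 ^ b)) = Int.ofNat (n &&& 2 ^ b) :=
        PySem.Int.band_natCast n (2 ^ b)
      rw [hband, Nat.and_two_pow]
      cases hb : n.testBit b <;> simp [Int.testBit, hb]
  | negSucc n =>
      rw [band_negSucc n (2 ^ b), Nat.and_comm, Nat.and_two_pow]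
      cases hb : n.testBit b <;> simp [Int.testBit, hb]

-- within N bits, subtracting from the all-ones mask complements every bit
theorem compl_testBit (k : Nat) : ∀ (N r : Nat), r < 2 ^ N → k < N →
    (2 ^ N - 1 - r).testBit k = !(r.testBit k) := by
  induction k with
  | zero =>
      intro N r hr hk
      have h2 : 2 ^ N = 2 * 2 ^ (N - 1) := by
        conv_lhs => rw [show N = (N - 1) + 1 by omega]
        rw [pow_succ, mul_comm]
      have hmod : (2 ^ N - 1 - r) % 2 = 1 - r % 2 := by omega
      rw [Nat.testBit_zero, Nat.testBit_zero, hmod]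
      rcases Nat.mod_two_eq_zero_or_one r with h | h <;> simp [h]
  | succ k ih =>
      intro N r hr hk
      have h2 : 2 ^ N = 2 * 2 ^ (N - 1) := by
        conv_lhs => rw [show N = (N - 1) + 1 by omega]
        rw [pow_succ, mul_comm]
      rw [Nat.testBit_add_one, Nat.testBit_add_one]
      have hdiv : (2 ^ N - 1 - r) / 2 = 2 ^ (N - 1) - 1 - r / 2 := by omega
      rw [hdiv]
      exact ih (N - 1) (r / 2) (by omega) (by omega)

-- the masked value m = bm & (2^N - 1): < 2^N, and keeps the low N bits of bm
theorem mask_spec (bm : Int) (N : Nat) :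
    (PySem.Int.band bm ((1 : Int) <<< N - 1)).toNat < 2 ^ N ∧
    (∀ k, k < N → (PySem.Int.band bm ((1 : Int) <<< N - 1)).toNat.testBit k = bm.testBit k) := by
  have h2 : 0 < 2 ^ N := Nat.two_pow_pos N
  have hs : ((1 : Int) <<< N) - 1 = Int.ofNat (2 ^ N - 1) := by
    have hs0 : (1 : Int) <<< N = Int.ofNat (2 ^ N) := by
      show Int.ofNat (1 <<< N) = Int.ofNat (2 ^ N); rw [Nat.one_shiftLeft]
    rw [hs0]
    simp only [Int.ofNat_eq_natCast]
    omega
  rw [hs]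
  cases bm with
  | ofNat a =>
      have hband : PySem.Int.band (Int.ofNat a) (Int.ofNat (2 ^ N - 1)) = Int.ofNat (a &&& (2 ^ N - 1)) :=
        PySem.Int.band_natCast a (2 ^ N - 1)
      rw [hband]
      refine ⟨by have := Nat.and_le_right (n := a) (m := 2 ^ N - 1); simp; omega, ?_⟩
      intro k hk
      show (a &&& (2 ^ N - 1)).testBit k = a.testBit k
      rw [Nat.testBit_and, Nat.testBit_two_pow_sub_one]
      simp [hk]
  | negSucc a =>
      rw [band_negSucc a (2 ^ N - 1)]
      have hle : (2 ^ N - 1) &&& a ≤ 2 ^ N - 1 := Nat.and_le_left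
      refine ⟨by simp; omega, ?_⟩
      intro k hk
      show ((2 ^ N - 1) - ((2 ^ N - 1) &&& a)).testBit k = Int.testBit (Int.negSucc a) k
      have hr : ((2 ^ N - 1) &&& a).testBit k = a.testBit k := by
        rw [Nat.testBit_and, Nat.testBit_two_pow_sub_one]; simp [hk]
      rw [compl_testBit k N ((2 ^ N - 1) &&& a) (by omega) hk, hr]
      rfl

-- binRev's digit at position k is the k-th bit (out-of-range defaults to '0')
theorem binRev_char (k : Nat) : ∀ (n : Nat),
    (binRev n)[k]?.getD '0' = if n.testBit k then '1' else '0' := by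
  induction k with
  | zero =>
      intro n
      cases n with
      | zero => simp [binRev]
      | succ m =>
          rw [binRev]
          rcases Nat.mod_two_eq_zero_or_one (m + 1) with h | h <;>
            simp [Nat.testBit_zero, h]
  | succ k ih =>
      intro n
      cases n with
      | zero => simp [binRev]
      | succ m =>
          rw [binRev]
          simp only [List.getElem?_cons_succ]
          rw [ih ((m + 1) / 2), Nat.testBit_add_one]

theorem binRev_length : ∀ (N n : Nat), n < 2 ^ N → (binRev n).length ≤ N := by
  intro N
  induction N with
  | zero => intro n hn; interval_cases n; simp [binRev]
  | succ N ih =>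
      intro n hn
      cases n with
      | zero => simp [binRev]
      | succ m =>
          rw [binRev]
          have : (m + 1) / 2 < 2 ^ N := by
            have := Nat.pow_succ 2 N
            omega
          simpa using ih ((m + 1) / 2) this

theorem revDigits_char (n k : Nat) :
    (revDigits n)[k]?.getD '0' = if n.testBit k then '1' else '0' := by
  by_cases h : n = 0
  · subst h
    cases k <;> simp [revDigits]
  · rw [revDigits, if_neg h]
    exact binRev_char k n

theorem revDigits_length (N n : Nat) (h1 : 1 ≤ N) (hn : n < 2 ^ N) :
    (revDigits n).length ≤ N := by
  by_cases h : n = 0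
  · subst h; simpa [revDigits] using h1
  · rw [revDigits, if_neg h]; exact binRev_length N n hn

-- zip-with-a-label-table then filter on the digit = filter the index range then map the label
theorem zip_filter_eq (cs : List Char) : ∀ (N : Nat) (g : Nat → String), cs.length ≤ N →
    (((cs.zip ((List.range N).map g)).filter (fun p => p.1 == '1')).map Prod.snd)
      = ((List.range N).filter (fun k => cs[k]?.getD '0' == '1')).map g := by
  induction cs with
  | nil =>
      intro N g _
      simp
  | cons c cs ih =>
      intro N g hlen
      obtain ⟨M, rfl⟩ : ∃ M, N = M + 1 := ⟨N - 1, by simp at hlen; omega⟩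
      have hlen' : cs.length ≤ M := by simp at hlen; omega
      rw [List.range_succ_eq_map]
      simp only [List.map_cons, List.zip_cons_cons, List.filter_cons, List.map_map]
      have hpred : ((fun k => (c :: cs)[k]?.getD '0' == '1') ∘ Nat.succ)
          = fun k => cs[k]?.getD '0' == '1' := by
        funext k; simp
      have h0 : ((c :: cs)[0]?.getD '0' == '1') = (c == '1') := rfl
      rw [h0, List.filter_map, hpred]
      cases hc : (c == '1')
      · simp only [Bool.false_eq_true, if_false]
        rw [List.map_map]
        exact ih M (g ∘ Nat.succ) hlen'
      · simp only [if_true, List.map_cons]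
        rw [List.map_map]
        exact congrArg (List.cons (g 0)) (ih M (g ∘ Nat.succ) hlen')

-- the label table B builds is the range-indexed table of gN
theorem labels_eq (l : List String) (bits : Int) (h : 0 < bits) :
    PySem.List.slice l none (some bits) ++
        (PySem.List.pyRange (l.length : Int) bits 1).map
          (fun b => "bit " ++ PySem.Int.toStr b ++ " undefined")
      = (List.range bits.toNat).map (gN l) := by
  rw [PySem.List.slice_to l (by omega : (0 : Int) ≤ bits), PySem.List.pyRange_one]
  apply List.ext_getElem
  · simp
    omega
  · intro i h1 h2
    simp only [List.length_map, List.length_range] at h2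
    simp only [List.getElem_map, List.getElem_range]
    by_cases hiL : i < (List.take bits.toNat l).length
    · rw [List.getElem_append_left hiL]
      have hiLl : i < l.length := by simp at hiL; omega
      rw [List.getElem_take]
      simp only [gN, if_pos hiLl]
      rw [List.getElem?_eq_getElem hiLl]
      rfl
    · rw [List.getElem_append_right (Nat.le_of_not_lt hiL)]
      simp only [List.getElem_map, List.getElem_range]
      have hlen : (List.take bits.toNat l).length = min bits.toNat l.length := by simp
      have hiLl : ¬ i < l.length := by
        rw [hlen] at hiL; omega
      have harg : ((l.length : Int) + ((i - (List.take bits.toNat l).length : Nat) : Int)) = (i : Int) := by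
        rw [hlen]; omega
      rw [harg]
      simp only [gN, if_neg hiLl]

-- port A in range-filter-map form
theorem A_eq (bm : Int) (l : List String) (bits : Int) :
    bitmask_to_strings bm l bits
      = ((List.range bits.toNat).filter (fun k => bm.testBit k)).map (gN l) := by
  unfold bitmask_to_strings
  rw [PySem.List.foldl_append_ite
        (fun bit => PySem.Int.band bm ((1 : Int) <<< (bit.toNat : Nat)) ≠ 0)
        (fun bit => if bit < (l.length : Int) then (PySem.List.pyGet? l bit).getD ""
                    else "bit " ++ PySem.Int.toStr bit ++ " undefined")]
  rw [PySem.List.pyRange_one, List.filter_map, List.map_map]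
  simp only [List.nil_append, Int.sub_zero]
  have hp : ((fun bit : Int => decide (PySem.Int.band bm ((1 : Int) <<< (bit.toNat : Nat)) ≠ 0))
        ∘ (fun k : Nat => (0 : Int) + (k : Int))) = fun k : Nat => bm.testBit k := by
    funext k
    simp only [Function.comp_apply, zero_add, Int.toNat_natCast]
    cases hb : bm.testBit k
    · have hz := (band_pow_ne bm k)
      rw [hb] at hz
      simp at hz
      simp [hz]
    · have hz := (band_pow_ne bm k).mpr hb
      simp [hz]
  have hf : ((fun bit : Int => if bit < (l.length : Int) then (PySem.List.pyGet? l bit).getD ""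
                else "bit " ++ PySem.Int.toStr bit ++ " undefined")
        ∘ (fun k : Nat => (0 : Int) + (k : Int))) = gN l := by
    funext k
    simp only [Function.comp_apply, zero_add, gN, Nat.cast_lt, PySem.List.pyGet?_natCast]
  rw [hp, hf]

-- port B in the same form (bits > 0)
theorem B_eq (bm : Int) (l : List String) (bits : Int) (h : 0 < bits) :
    bitmask_to_strings_alt bm l bits
      = ((List.range bits.toNat).filter (fun k => bm.testBit k)).map (gN l) := by
  have hN : 1 ≤ bits.toNat := by omega
  obtain ⟨hlt, hbit⟩ := mask_spec bm bits.toNat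
  simp only [bitmask_to_strings_alt, if_neg (not_le.mpr h)]
  rw [labels_eq l bits h]
  rw [zip_filter_eq _ bits.toNat (gN l)
        (revDigits_length bits.toNat _ hN hlt)]
  congr 1
  apply List.filter_congr
  intro k hk
  rw [List.mem_range] at hk
  rw [revDigits_char]
  rw [hbit k hk]
  cases bm.testBit k <;> simp

-- ===== VERDICT (by name: the statement is the Claim_ definition above) =====
theorem bitmask_to_strings_spec : Claim_equal_bitmask_to_strings := by
  intro bm l bits _
  unfold Spec_bitmask_to_strings
  by_cases h : bits ≤ 0
  · unfold bitmask_to_strings bitmask_to_strings_alt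
    rw [if_pos h, PySem.List.pyRange_one_eq_nil (by omega)]
    rfl
  · rw [A_eq, B_eq bm l bits (by omega)]
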